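-- pv_equiv track=rewrite | github.com/tobackes/outcite-duplicate_detecting | code/blocking/code/disambiguate_v3.py | find_min_els
-- ===== SOURCE A (Python) =====
-- def generalizes(rep1,rep2): #generalizes itself, too
--     return len(rep1-rep2)==0;
--
-- def find_min_els(repIDs,ID2rep):
--     min_els = set(repIDs);
--     for x in repIDs:#[tup[1] for tup in sorted([(len(ID2rep[repID]),repID,) for repID in repIDs])]:
--         check = False;
--         for min_el in min_els:
--             if generalizes(ID2rep[min_el],ID2rep[x]) and min_el!=x:
--                 check = True;
--                 break;
--         if check:
--             min_els.remove(x);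
--     return min_els;
-- ===== SOURCE B (Python) =====
-- def find_min_els(repIDs, ID2rep):
--     # An id is minimal iff no id in the list carries a strictly smaller rep set.
--     return {x for x in repIDs
--             if not any(ID2rep[y] < ID2rep[x] for y in repIDs)}
-- ===== Notes on version B (the rewrite author's own statement) =====
-- stated objective: simpler
-- what changed: A prunes a mutable live set in place (removal depends on what is still live when each id is scanned); B is a single pure comprehension keeping exactly the ids whose rep has no strict subset in the list; Pre_ excludes inputs where two distinct ids carry the same minimal rep set, because there A keeps only the last carrier by an arbitrary mutation-order tie-break while B keeps every carrier, both defensible (the other Pre_ clauses only exclude inputs on which A raises KeyError).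
-- outside the precondition, e.g. on find_min_els(['a', 'b'], {'a': {'1'}, 'b': {'1'}}): A returns {'b'}, B returns {'a', 'b'}; on find_min_els(['a', 'a', 'b'], {'a': {'2', '1'}, 'b': {'1'}}): A raises KeyError, B returns {'b'}
import Mathlib
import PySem

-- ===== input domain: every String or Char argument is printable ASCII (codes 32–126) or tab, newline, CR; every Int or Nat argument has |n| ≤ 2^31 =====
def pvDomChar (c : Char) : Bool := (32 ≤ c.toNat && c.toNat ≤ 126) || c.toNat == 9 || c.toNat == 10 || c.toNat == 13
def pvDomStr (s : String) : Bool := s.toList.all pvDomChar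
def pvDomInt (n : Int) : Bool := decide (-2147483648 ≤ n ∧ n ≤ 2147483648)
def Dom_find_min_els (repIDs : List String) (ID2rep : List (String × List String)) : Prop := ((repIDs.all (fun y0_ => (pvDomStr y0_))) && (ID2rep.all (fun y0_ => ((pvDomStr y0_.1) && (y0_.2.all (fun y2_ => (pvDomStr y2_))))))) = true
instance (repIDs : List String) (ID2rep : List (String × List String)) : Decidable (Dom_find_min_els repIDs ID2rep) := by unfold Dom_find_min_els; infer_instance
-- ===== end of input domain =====

-- B replaces A's in-place pruning of a mutable live set by a single pure comprehension
-- keeping the ids whose rep has no strict subset in the list (objective: simpler).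

-- ===== PORT A =====
-- len(rep1-rep2)==0 : set difference empty
def generalizes (rep1 rep2 : List String) : Bool :=
  PySem.Set.len (PySem.Set.diff rep1 rep2) == 0

-- The inner 'for min_el in min_els: … break' is a pure existence test, so its result does not
-- depend on Python's set iteration order; it is ported as '.any'.  'min_els.remove(x)' is exact
-- under Pre_ (x is always still present there); the dict lookups ID2rep[·] are exact under Pre_
-- (every repID is a key).
def find_min_els (repIDs : List String) (ID2rep : List (String × List String)) : List String :=
  repIDs.foldl
    (fun min_els x =>
      let check := min_els.any (fun min_el =>
        generalizes ((PySem.Dict.mk ID2rep).getD min_el []) ((PySem.Dict.mk ID2rep).getD x [])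
          && min_el != x)
      if check then PySem.Set.discard min_els x else min_els)
    (PySem.Set.ofList repIDs)

-- ===== PORT B =====
-- Python's 's < t' on sets is subset-and-not-equal
def find_min_els_alt (repIDs : List String) (ID2rep : List (String × List String)) : List String :=
  PySem.Set.ofList (repIDs.filter (fun x =>
    !(repIDs.any (fun y =>
      PySem.Set.issubset ((PySem.Dict.mk ID2rep).getD y []) ((PySem.Dict.mk ID2rep).getD x [])
        && !(PySem.Set.equal ((PySem.Dict.mk ID2rep).getD y []) ((PySem.Dict.mk ID2rep).getD x []))))))

-- ===== PRECONDITION & SPEC =====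
-- the rep set an id carries (the dict lookup both ports perform)
def repv (I : List (String × List String)) (x : String) : List String :=
  (PySem.Dict.mk I).getD x []

-- Pre_ excludes: (a) repIDs not all keys of ID2rep (A raises KeyError); (b) two DISTINCT ids
-- carrying the same rep set when that set is minimal (no strict subset among the listed reps) —
-- there A keeps only the last carrier by an arbitrary mutation-order tie-break while B keeps
-- every carrier, both values defensible; (c) an id repeated in repIDs whose rep is NOT minimal —
-- there A removes it at its first occurrence and min_els.remove raises KeyError at the second.
def Pre_find_min_els (repIDs : List String) (ID2rep : List (String × List String)) : Prop :=
  (∀ x ∈ repIDs, (PySem.Dict.mk ID2rep).contains x = true) ∧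
  List.Pairwise (fun a b => a ≠ b →
    ((∀ e ∈ repv ID2rep a, e ∈ repv ID2rep b) ∧ (∀ e ∈ repv ID2rep b, e ∈ repv ID2rep a)) →
    ∃ z ∈ repIDs, (∀ e ∈ repv ID2rep z, e ∈ repv ID2rep a) ∧
      ¬ (∀ e ∈ repv ID2rep a, e ∈ repv ID2rep z)) repIDs ∧
  (∀ x ∈ repIDs, 1 < repIDs.count x →
    ∀ z ∈ repIDs, (∀ e ∈ repv ID2rep z, e ∈ repv ID2rep x) →
      (∀ e ∈ repv ID2rep x, e ∈ repv ID2rep z))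
instance (repIDs : List String) (ID2rep : List (String × List String)) : Decidable (Pre_find_min_els repIDs ID2rep) := by unfold Pre_find_min_els; infer_instance

def pvWitness_find_min_els : List String × (List (String × List String)) :=
  (["a", "b"], [("a", ["1"]), ("b", ["1", "2"])])

def Spec_find_min_els (repIDs : List String) (ID2rep : List (String × List String)) (out : List String) : Prop := out = find_min_els_alt repIDs ID2rep
instance (repIDs : List String) (ID2rep : List (String × List String)) (out : List String) : Decidable (Spec_find_min_els repIDs ID2rep out) := by unfold Spec_find_min_els; infer_instance

-- ===== CLAIM (what is proved, stated in full; the proofs are below) =====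
def Claim_equal_find_min_els : Prop := ∀ (repIDs : List String) (ID2rep : List (String × List String)), Dom_find_min_els repIDs ID2rep → Pre_find_min_els repIDs ID2rep → Spec_find_min_els repIDs ID2rep (find_min_els repIDs ID2rep)

-- ===== LEMMAS AND PROOFS =====

-- the subset relation between two ids' reps
def SubP (I : List (String × List String)) (m x : String) : Prop :=
  ∀ e ∈ repv I m, e ∈ repv I x

-- B's filter predicate
def PB (I : List (String × List String)) (L : List String) (x : String) : Bool :=
  !(L.any (fun y =>
      PySem.Set.issubset (repv I y) (repv I x) && !(PySem.Set.equal (repv I y) (repv I x))))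

theorem gen_iff (r1 r2 : List String) :
    generalizes r1 r2 = true ↔ ∀ e ∈ r1, e ∈ r2 := by
  simp [generalizes, PySem.Set.diff, PySem.Set.len, List.filter_eq_nil_iff]

theorem PB_iff (I : List (String × List String)) (L : List String) (x : String) :
    PB I L x = true ↔ ∀ y ∈ L, SubP I y x → SubP I x y := by
  unfold PB SubP
  rw [Bool.not_eq_eq_eq_not, Bool.not_true, List.any_eq_false]
  constructor
  · intro h y hy hsub
    have hyy := h y hy
    have h1 : PySem.Set.issubset (repv I y) (repv I x) = true :=
      (PySem.Set.issubset_iff _ _).2 hsub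
    have heq : PySem.Set.equal (repv I y) (repv I x) = true := by
      by_contra hne
      exact hyy (by simp [h1, Bool.eq_false_iff.mpr hne])
    intro e he
    exact ((PySem.Set.equal_iff _ _).1 heq e).2 he
  · intro h y hy hc
    rw [Bool.and_eq_true] at hc
    obtain ⟨h1, h2⟩ := hc
    have hsub := (PySem.Set.issubset_iff _ _).1 h1
    have hback := h y hy hsub
    have : PySem.Set.equal (repv I y) (repv I x) = true :=
      (PySem.Set.equal_iff _ _).2 (fun e => ⟨fun he => hsub e he, fun he => hback e he⟩)
    simp [this] at h2

-- Pre_'s clause (b) is symmetric: a dominating witness transfers across set equality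
theorem pre2_symm (I : List (String × List String)) (L : List String) :
    Symmetric (fun a b => a ≠ b → (SubP I a b ∧ SubP I b a) →
      ∃ z ∈ L, SubP I z a ∧ ¬ SubP I a z) := by
  intro a b h hne hmut
  obtain ⟨z, hz, h1, h2⟩ := h (fun hc => hne hc.symm) ⟨hmut.2, hmut.1⟩
  refine ⟨z, hz, fun e he => hmut.2 e (h1 e he),
    fun hsub => h2 (fun e he => hsub e (hmut.2 e he))⟩

-- under Pre_, a live id mutually subset with a B-minimal id is that id
theorem subP_antisymm (I : List (String × List String)) {L : List String}
    (hpw : List.Pairwise (fun a b => a ≠ b → (SubP I a b ∧ SubP I b a) →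
      ∃ z ∈ L, SubP I z a ∧ ¬ SubP I a z) L)
    {m x : String} (hm : m ∈ L) (hx : x ∈ L)
    (h1 : SubP I m x) (h2 : SubP I x m) (hPx : PB I L x = true) : m = x := by
  by_contra hne
  obtain ⟨z, hz, hzm, hnmz⟩ :=
    List.Pairwise.forall (pre2_symm I L) hpw hm hx hne hne ⟨h1, h2⟩
  have hzx : SubP I z x := fun e he => h1 e (hzm e he)
  have hxz : SubP I x z := (PB_iff I L x).1 hPx z hz hzx
  exact hnmz (fun e he => hxz e (h1 e he))

theorem subP_trans (I : List (String × List String)) {a b c : String}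
    (h1 : SubP I a b) (h2 : SubP I b c) : SubP I a c := fun e he => h2 e (h1 e he)

theorem exists_min_witness (I : List (String × List String))
    (L : List String) {x y : String} (hy : y ∈ L) (hs : SubP I y x) (hns : ¬ SubP I x y) :
    ∃ m ∈ L, SubP I m x ∧ ¬ SubP I x m ∧ (∀ z ∈ L, SubP I z m → SubP I m z) := by
  have main : ∀ n (y : String), y ∈ L → SubP I y x → ¬ SubP I x y →
      (repv I y).toFinset.card ≤ n →
      ∃ m ∈ L, SubP I m x ∧ ¬ SubP I x m ∧ (∀ z ∈ L, SubP I z m → SubP I m z) := by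
    intro n
    induction n with
    | zero =>
      intro y hy hs hns hlen
      refine ⟨y, hy, hs, hns, ?_⟩
      intro z hz hzy e he
      have hnil : (repv I y).toFinset = ∅ := Finset.card_eq_zero.1 (Nat.le_zero.1 hlen)
      exact absurd (List.mem_toFinset.2 he) (by rw [hnil]; exact Finset.notMem_empty e)
    | succ n ih =>
      intro y hy hs hns hlen
      by_cases hmin : ∀ z ∈ L, SubP I z y → SubP I y z
      · exact ⟨y, hy, hs, hns, hmin⟩
      · push Not at hmin
        obtain ⟨z, hz, hzy, hnyz⟩ := hmin
        have hzx : SubP I z x := subP_trans I hzy hs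
        have hnxz : ¬ SubP I x z := fun hxz => hns (subP_trans I hxz hzy)
        have hlt : (repv I z).toFinset.card < (repv I y).toFinset.card := by
          apply Finset.card_lt_card
          constructor
          · intro e he
            rw [List.mem_toFinset] at he ⊢
            exact hzy e he
          · intro hcon
            apply hnyz
            intro e he
            have := hcon (List.mem_toFinset.2 he)
            rwa [List.mem_toFinset] at this
        exact ih z hz hzx hnxz (by omega)
  exact main (repv I y).toFinset.card y hy hs hns le_rfl

-- set(…) of a filtered list is the filtered deduplication
theorem ofList_filter {α : Type} [DecidableEq α] (p : α → Bool) (xs : List α) :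
    PySem.Set.ofList (xs.filter p) = (PySem.Set.ofList xs).filter p := by
  induction xs with
  | nil => rfl
  | cons x t ih =>
    rw [PySem.Set.ofList_cons, List.filter_cons]
    by_cases hp : p x = true
    · rw [if_pos hp, PySem.Set.ofList_cons, List.filter_cons, if_pos hp, ih]
      unfold PySem.Set.discard
      rw [List.filter_filter, List.filter_filter]
      congr 1
      apply List.filter_congr
      intro y _
      exact Bool.and_comm _ _
    · rw [if_neg hp, List.filter_cons, if_neg hp, ih]
      unfold PySem.Set.discard
      rw [List.filter_filter]
      symm
      apply List.filter_congr
      intro y _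
      by_cases hyx : y = x <;> simp [hyx, hp]

theorem foldA_inv (I : List (String × List String)) (L : List String)
    (hpw : List.Pairwise (fun a b => a ≠ b → (SubP I a b ∧ SubP I b a) →
      ∃ z ∈ L, SubP I z a ∧ ¬ SubP I a z) L)
    (h3 : ∀ x ∈ L, 1 < L.count x → ∀ z ∈ L, SubP I z x → SubP I x z) :
    ∀ suf pre, pre ++ suf = L →
      suf.foldl
        (fun min_els x =>
          let check := min_els.any (fun min_el =>
            generalizes ((PySem.Dict.mk I).getD min_el []) ((PySem.Dict.mk I).getD x [])
              && min_el != x)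
          if check then PySem.Set.discard min_els x else min_els)
        ((PySem.Set.ofList L).filter (fun y => suf.contains y || PB I L y))
      = (PySem.Set.ofList L).filter (fun y => PB I L y) := by
  intro suf
  induction suf with
  | nil =>
    intro pre h
    simp
  | cons x rest ih =>
    intro pre hsplit
    rw [List.foldl_cons]
    have hxL : x ∈ L := by rw [← hsplit]; simp
    have hmem_s : ∀ m, m ∈ (PySem.Set.ofList L).filter (fun y => (x :: rest).contains y || PB I L y) ↔
        m ∈ L ∧ ((m ∈ x :: rest) ∨ PB I L m = true) := by
      intro m
      rw [List.mem_filter, Bool.or_eq_true, PySem.Set.mem_ofList]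
      simp
    have hany : ∀ (s : List String),
        (s.any (fun min_el =>
          generalizes ((PySem.Dict.mk I).getD min_el []) ((PySem.Dict.mk I).getD x [])
            && min_el != x) = true) ↔ ∃ m ∈ s, SubP I m x ∧ m ≠ x := by
      intro s
      rw [List.any_eq_true]
      constructor
      · rintro ⟨m, hm, hc⟩
        rw [Bool.and_eq_true, bne_iff_ne] at hc
        exact ⟨m, hm, (gen_iff _ _).1 hc.1, hc.2⟩
      · rintro ⟨m, hm, hsub, hne⟩
        refine ⟨m, hm, ?_⟩
        rw [Bool.and_eq_true, bne_iff_ne]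
        exact ⟨(gen_iff _ _).2 hsub, hne⟩
    have hstep :
        (if ((PySem.Set.ofList L).filter (fun y => (x :: rest).contains y || PB I L y)).any (fun min_el =>
            generalizes ((PySem.Dict.mk I).getD min_el []) ((PySem.Dict.mk I).getD x [])
              && min_el != x)
          then PySem.Set.discard ((PySem.Set.ofList L).filter (fun y => (x :: rest).contains y || PB I L y)) x
          else (PySem.Set.ofList L).filter (fun y => (x :: rest).contains y || PB I L y))
        = (PySem.Set.ofList L).filter (fun y => rest.contains y || PB I L y) := by
      by_cases hPx : PB I L x = true
      · -- x is minimal: check is false, state unchanged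
        have hfalse : ¬ (((PySem.Set.ofList L).filter (fun y => (x :: rest).contains y || PB I L y)).any
            (fun min_el => generalizes ((PySem.Dict.mk I).getD min_el [])
              ((PySem.Dict.mk I).getD x []) && min_el != x) = true) := by
          rw [hany]
          rintro ⟨m, hm, hsub, hne⟩
          rw [hmem_s] at hm
          have hback : SubP I x m := (PB_iff I L x).1 hPx m hm.1 hsub
          exact hne (subP_antisymm I hpw hm.1 hxL hsub hback hPx)
        rw [if_neg hfalse]
        apply List.filter_congr
        intro y hy
        by_cases hyx : y = x
        · subst hyx
          simp [hPx]
        · have : ((x :: rest).contains y) = (rest.contains y) := by simp [hyx]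
          rw [this]
      · -- x is dominated: check is true, x removed; x cannot repeat in rest (clause (c))
        have hxrest : x ∉ rest := by
          intro hxr
          apply hPx
          rw [PB_iff]
          apply h3 x hxL
          rw [← hsplit, List.count_append, List.count_cons_self]
          have : 0 < rest.count x := List.count_pos_iff.2 hxr
          omega
        have htrue : ((PySem.Set.ofList L).filter (fun y => (x :: rest).contains y || PB I L y)).any
            (fun min_el => generalizes ((PySem.Dict.mk I).getD min_el [])
              ((PySem.Dict.mk I).getD x []) && min_el != x) = true := by
          rw [hany]
          have hex : ∃ y ∈ L, SubP I y x ∧ ¬ SubP I x y := by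
            have := (not_iff_not.2 (PB_iff I L x)).1 (by simpa using hPx)
            push Not at this
            exact this
          obtain ⟨y, hy, hsyx, hnxy⟩ := hex
          obtain ⟨m, hmL, hmx, hnxm, hmmin⟩ := exists_min_witness I L hy hsyx hnxy
          have hne : m ≠ x := fun h => hnxm (by rw [h]; exact fun e he => he)
          refine ⟨m, (hmem_s m).2 ⟨hmL, Or.inr ((PB_iff I L m).2 hmmin)⟩, hmx, hne⟩
        rw [if_pos htrue]
        unfold PySem.Set.discard
        rw [List.filter_filter]
        apply List.filter_congr
        intro y hy
        by_cases hyx : y = x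
        · subst hyx
          simp [hPx, hxrest]
        · have h1 : (!(y == x)) = true := by simp [hyx]
          have h2 : ((x :: rest).contains y) = (rest.contains y) := by simp [hyx]
          rw [h1, h2]
          simp
    rw [hstep]
    exact ih (pre ++ [x]) (by rw [← hsplit]; simp)

-- ===== VERDICT (by name: the statement is the Claim_ definition above) =====
theorem find_min_els_spec : Claim_equal_find_min_els := by
  intro L I _hdom hpre
  obtain ⟨_hk, hpw, h3⟩ := hpre
  show find_min_els L I = find_min_els_alt L I
  have h0 : PySem.Set.ofList L = (PySem.Set.ofList L).filter (fun y => L.contains y || PB I L y) := by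
    symm
    apply List.filter_eq_self.2
    intro y hy
    have : y ∈ L := (PySem.Set.mem_ofList _ _).1 hy
    simp [this]
  have hb : find_min_els_alt L I = (PySem.Set.ofList L).filter (fun y => PB I L y) := by
    show PySem.Set.ofList (L.filter (fun x => PB I L x)) = _
    exact ofList_filter _ L
  rw [find_min_els, h0, foldA_inv I L hpw h3 L [] rfl, hb]
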